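-- pv_equiv track=rewrite | github.com/Jessica-IX/DreamSchoolQ | Q2.py | bracketsCheck
-- ===== SOURCE A (Python) =====
-- def bracketsCheck(line):
--     stack = []
--     result = []
--
--     for i, char in enumerate(line):
--         if char == '(':
--             stack.append(i)
--         elif char == ')':
--             if stack:
--                 stack.pop()
--                 result.append(' ')
--                 result.append(' ')
--             else:
--                 result.append('?')
--         else:
--             result.append(' ')
--
--     for index in stack:
--         result.insert(index, 'x')
--
--     return ''.join(result)
-- ===== SOURCE B (Python) =====
-- def bracketsCheck(line):
--     depth = 0
--     fwd = []
--     for ch in line: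
--         if ch == '(':
--             depth += 1
--             fwd.append('(')
--         elif ch == ')':
--             if depth:
--                 depth -= 1
--                 fwd.append(' ')
--             else:
--                 fwd.append('?')
--         else:
--             fwd.append(' ')
--     res = []
--     avail = 0
--     for ch, m in zip(reversed(line), reversed(fwd)):
--         if ch == ')':
--             avail += 1
--             res.append(m)
--         elif ch == '(':
--             if avail:
--                 avail -= 1
--                 res.append(' ')
--             else:
--                 res.append('x')
--         else:
--             res.append(m)
--     res.reverse()
--     return ''.join(res)
-- ===== Notes on version B (the rewrite author's own statement) =====
-- stated objective: alternative
-- what changed: A keeps a stack of '(' indices and afterwards marks each unmatched '(' with a separate O(n) list.insert; B uses no stack and no insertions: a forward depth-counter scan decides the unmatched ')' and a backward avail-counter scan decides the unmatched '(', building the output directly.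
import Mathlib
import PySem

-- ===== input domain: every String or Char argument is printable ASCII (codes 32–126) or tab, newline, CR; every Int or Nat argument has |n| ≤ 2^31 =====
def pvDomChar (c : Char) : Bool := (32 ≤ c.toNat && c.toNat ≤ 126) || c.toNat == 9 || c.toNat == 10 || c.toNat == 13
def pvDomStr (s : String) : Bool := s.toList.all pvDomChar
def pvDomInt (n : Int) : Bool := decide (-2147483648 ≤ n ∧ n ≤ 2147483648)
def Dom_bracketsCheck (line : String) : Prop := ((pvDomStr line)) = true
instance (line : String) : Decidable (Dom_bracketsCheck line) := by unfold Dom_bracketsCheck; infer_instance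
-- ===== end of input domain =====

-- B replaces A's stack of indices and repeated list.insert calls by two counter scans
-- (forward for unmatched ')' and backward for unmatched '(') that build the output directly.

-- ===== PORT A =====
-- one iteration of A's main loop: state (stack, result), item (i, char)
def pvStepA (st : List Int × List Char) (p : Int × Char) : List Int × List Char :=
  if p.2 = '(' then (st.1 ++ [p.1], st.2)
  else if p.2 = ')' then
    (if st.1 ≠ [] then (st.1.dropLast, st.2 ++ [' ', ' ']) else (st.1, st.2 ++ ['?']))
  else (st.1, st.2 ++ [' '])

def bracketsCheck (line : String) : String :=
  let fin := (PySem.List.enumerate line.toList).foldl pvStepA ([], [])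
  String.mk (fin.1.foldl (fun r idx => PySem.List.insert r idx 'x') fin.2)

-- ===== PORT B =====
-- first loop of B: forward scan, depth counter; keeps '(' as a marker
def pvFwdB (depth : Int) : List Char → List Char
  | [] => []
  | c :: cs =>
    if c = '(' then '(' :: pvFwdB (depth + 1) cs
    else if c = ')' then
      (if depth ≠ 0 then ' ' :: pvFwdB (depth - 1) cs else '?' :: pvFwdB depth cs)
    else ' ' :: pvFwdB depth cs

-- second loop of B: scan over zip(reversed(line), reversed(fwd)) with an avail counter
def pvBwdB (avail : Int) : List (Char × Char) → List Char
  | [] => []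
  | p :: ps =>
    if p.1 = ')' then p.2 :: pvBwdB (avail + 1) ps
    else if p.1 = '(' then
      (if avail ≠ 0 then ' ' :: pvBwdB (avail - 1) ps else 'x' :: pvBwdB avail ps)
    else p.2 :: pvBwdB avail ps

def bracketsCheck_alt (line : String) : String :=
  let cs := line.toList
  let fwd := pvFwdB 0 cs
  let res := pvBwdB 0 (cs.reverse.zip fwd.reverse)
  String.mk res.reverse

-- ===== PRECONDITION & SPEC =====
def Spec_bracketsCheck (line : String) (out : String) : Prop := out = bracketsCheck_alt line
instance (line : String) (out : String) : Decidable (Spec_bracketsCheck line out) := by unfold Spec_bracketsCheck; infer_instance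

-- ===== CLAIM (what is proved, stated in full; the proofs are below) =====
def Claim_equal_bracketsCheck : Prop := ∀ (line : String), Dom_bracketsCheck line → Spec_bracketsCheck line (bracketsCheck line)

-- ===== LEMMAS AND PROOFS =====

-- forward depth counter (ℕ, saturating at 0 like A's stack height / B's depth)
def pvDN (d : Nat) : List Char → Nat
  | [] => d
  | c :: cs => pvDN (if c = '(' then d + 1 else if c = ')' then d - 1 else d) cs

-- backward avail counter (ℕ): right-to-left scan, head processed last
def pvF (a : Nat) : List Char → Nat
  | [] => a
  | c :: cs =>
    let v := pvF a cs
    if c = ')' then v + 1 else if c = '(' then v - 1 else v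

-- the common elementwise description of the output
def pvOutFun (cs : List Char) (j : Nat) : Char :=
  if cs[j]? = some '(' then (if pvF 0 (cs.drop (j + 1)) = 0 then 'x' else ' ')
  else if cs[j]? = some ')' then (if pvDN 0 (cs.take j) = 0 then '?' else ' ')
  else ' '

def pvOut (cs : List Char) : List Char := (List.range cs.length).map (pvOutFun cs)

-- unmatched-'(' positions
def pvXb (cs : List Char) (j : Nat) : Bool :=
  decide (cs[j]? = some '(') && decide (pvF 0 (cs.drop (j + 1)) = 0)

def pvXs (cs : List Char) : List Nat := (List.range cs.length).filter (pvXb cs)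

-- structural versions of A's loop state
def pvStk (s : List Int) (i : Int) : List Char → List Int
  | [] => s
  | c :: cs =>
    if c = '(' then pvStk (s ++ [i]) (i + 1) cs
    else if c = ')' then pvStk s.dropLast (i + 1) cs
    else pvStk s (i + 1) cs

def pvRend (d : Nat) : List Char → List Char
  | [] => []
  | c :: cs =>
    if c = '(' then pvRend (d + 1) cs
    else if c = ')' then (if d = 0 then '?' :: pvRend 0 cs else ' ' :: ' ' :: pvRend (d - 1) cs)
    else ' ' :: pvRend d cs

theorem pvLoopA_eq (cs : List Char) : ∀ (s : List Int) (r : List Char) (i : Int),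
    (PySem.List.enumerate cs i).foldl pvStepA (s, r) = (pvStk s i cs, r ++ pvRend s.length cs) := by
  induction cs with
  | nil => intro s r i; simp [PySem.List.enumerate, pvStk, pvRend]
  | cons c cs ih =>
    intro s r i
    rw [PySem.List.enumerate_cons, List.foldl_cons]
    by_cases h1 : c = '('
    · subst h1
      have hstep : pvStepA (s, r) (i, '(') = (s ++ [i], r) := by simp [pvStepA]
      rw [hstep, ih (s ++ [i]) r (i + 1)]
      simp [pvStk, pvRend]
    · by_cases h2 : c = ')'
      · subst h2
        by_cases h3 : s = []
        · subst h3
          have hstep : pvStepA ([], r) (i, ')') = ([], r ++ ['?']) := by simp [pvStepA]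
          rw [hstep, ih [] (r ++ ['?']) (i + 1)]
          simp [pvStk, pvRend]
        · have hstep : pvStepA (s, r) (i, ')') = (s.dropLast, r ++ [' ', ' ']) := by
            simp [pvStepA, h3]
          rw [hstep, ih s.dropLast (r ++ [' ', ' ']) (i + 1)]
          have hlen : s.dropLast.length = s.length - 1 := List.length_dropLast
          have hne : s.length ≠ 0 := by simpa [List.length_eq_zero_iff] using h3
          simp only [pvStk, pvRend, if_neg h1, if_neg hne, hlen]
          simp
      · have hstep : pvStepA (s, r) (i, c) = (s, r ++ [' ']) := by
          simp [pvStepA, h1, h2]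
        rw [hstep, ih s (r ++ [' ']) (i + 1)]
        simp [pvStk, pvRend, h1, h2]

-- ℕ versions of B's two loops (the ports use Python ints, i.e. ℤ, but the counters stay ≥ 0)
def pvFwdN (d : Nat) : List Char → List Char
  | [] => []
  | c :: cs =>
    if c = '(' then '(' :: pvFwdN (d + 1) cs
    else if c = ')' then
      (if d ≠ 0 then ' ' :: pvFwdN (d - 1) cs else '?' :: pvFwdN d cs)
    else ' ' :: pvFwdN d cs

def pvBwdN (a : Nat) : List (Char × Char) → List Char
  | [] => []
  | p :: ps =>
    if p.1 = ')' then p.2 :: pvBwdN (a + 1) ps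
    else if p.1 = '(' then
      (if a ≠ 0 then ' ' :: pvBwdN (a - 1) ps else 'x' :: pvBwdN a ps)
    else p.2 :: pvBwdN a ps

theorem pvFwdB_cast (cs : List Char) : ∀ (d : Nat), pvFwdB (d : Int) cs = pvFwdN d cs := by
  induction cs with
  | nil => intro d; rfl
  | cons c cs ih =>
    intro d
    unfold pvFwdB pvFwdN
    by_cases h1 : c = '('
    · rw [if_pos h1, if_pos h1, show ((d : Int) + 1) = ((d + 1 : Nat) : Int) by omega, ih]
    · by_cases h2 : c = ')'
      · rw [if_neg h1, if_neg h1, if_pos h2, if_pos h2]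
        rcases Nat.eq_zero_or_pos d with hd | hd
        · subst hd
          rw [if_neg (by omega), if_neg (by omega)]
          exact congrArg _ (ih 0)
        · rw [if_pos (show (d : Int) ≠ 0 by omega), if_pos (show d ≠ 0 by omega),
            show ((d : Int) - 1) = ((d - 1 : Nat) : Int) by omega, ih]
      · rw [if_neg h1, if_neg h1, if_neg h2, if_neg h2, ih]

theorem pvBwdB_cast (ps : List (Char × Char)) : ∀ (a : Nat), pvBwdB (a : Int) ps = pvBwdN a ps := by
  induction ps with
  | nil => intro a; rfl
  | cons p ps ih =>
    intro a
    unfold pvBwdB pvBwdN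
    by_cases h1 : p.1 = ')'
    · rw [if_pos h1, if_pos h1, show ((a : Int) + 1) = ((a + 1 : Nat) : Int) by omega, ih]
    · by_cases h2 : p.1 = '('
      · rw [if_neg h1, if_neg h1, if_pos h2, if_pos h2]
        rcases Nat.eq_zero_or_pos a with ha | ha
        · subst ha
          rw [if_neg (by omega), if_neg (by omega)]
          exact congrArg _ (ih 0)
        · rw [if_pos (show (a : Int) ≠ 0 by omega), if_pos (show a ≠ 0 by omega),
            show ((a : Int) - 1) = ((a - 1 : Nat) : Int) by omega, ih]
      · rw [if_neg h1, if_neg h1, if_neg h2, if_neg h2, ih]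

theorem pvF_append (v : List Char) : ∀ (u : List Char) (a : Nat),
    pvF a (u ++ v) = pvF (pvF a v) u := by
  intro u
  induction u with
  | nil => intro a; simp [pvF]
  | cons c u ih => intro a; simp [pvF, ih]

theorem pvF_single (a : Nat) (c : Char) :
    pvF a [c] = (if c = ')' then a + 1 else if c = '(' then a - 1 else a) := by
  simp [pvF]

theorem pvFwdN_length (cs : List Char) : ∀ (d : Nat), (pvFwdN d cs).length = cs.length := by
  induction cs with
  | nil => intro d; rfl
  | cons c cs ih =>
    intro d
    by_cases h1 : c = '(' <;> by_cases h2 : c = ')' <;>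
      simp [pvFwdN, h1, h2, ih] <;> split <;> simp [ih]

theorem pvFwd_getD (cs : List Char) : ∀ (d j : Nat), j < cs.length →
    ((pvFwdN d cs)[j]?).getD ' ' =
      (if cs[j]? = some '(' then '('
       else if cs[j]? = some ')' then (if pvDN d (cs.take j) = 0 then '?' else ' ')
       else ' ') := by
  induction cs with
  | nil => intro d j h; simp at h
  | cons c cs ih =>
    intro d j hj
    match j with
    | 0 =>
      by_cases h1 : c = '('
      · simp [pvFwdN, h1, pvDN]
      · by_cases h2 : c = ')'
        · rcases Nat.eq_zero_or_pos d with hd | hd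
          · subst hd; simp [pvFwdN, h1, h2, pvDN]
          · have hz : d ≠ 0 := by omega
            simp [pvFwdN, h1, h2, hz, pvDN]
        · simp [pvFwdN, h1, h2, pvDN]
    | j + 1 =>
      have hj' : j < cs.length := by simpa using hj
      have htake : (c :: cs).take (j + 1) = c :: cs.take j := by simp
      by_cases h1 : c = '('
      · subst h1
        rw [show pvFwdN d ('(' :: cs) = '(' :: pvFwdN (d + 1) cs from by simp [pvFwdN]]
        simp only [List.getElem?_cons_succ, htake]
        rw [ih (d + 1) j hj']
        simp [pvDN]
      · by_cases h2 : c = ')'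
        · subst h2
          by_cases hz : d ≠ 0
          · rw [show pvFwdN d (')' :: cs) = ' ' :: pvFwdN (d - 1) cs from by
              simp [pvFwdN, hz]]
            simp only [List.getElem?_cons_succ, htake]
            rw [ih (d - 1) j hj']
            simp [pvDN]
          · have hd : d = 0 := by omega
            subst hd
            rw [show pvFwdN 0 (')' :: cs) = '?' :: pvFwdN 0 cs from by simp [pvFwdN]]
            simp only [List.getElem?_cons_succ, htake]
            rw [ih 0 j hj']
            simp [pvDN]
        · rw [show pvFwdN d (c :: cs) = ' ' :: pvFwdN d cs from by simp [pvFwdN, h1, h2]]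
          simp only [List.getElem?_cons_succ, htake]
          rw [ih d j hj']
          simp [pvDN, h1, h2]

theorem pvBwdN_spec : ∀ (rcs rms : List Char) (a : Nat), rms.length = rcs.length →
    (pvBwdN a (rcs.zip rms)).reverse =
      (List.range rcs.length).map (fun j =>
        if rcs.reverse[j]? = some '(' then
          (if pvF a (rcs.reverse.drop (j + 1)) = 0 then 'x' else ' ')
        else ((rms.reverse)[j]?).getD ' ') := by
  intro rcs
  induction rcs with
  | nil => intro rms a h; simp [pvBwdN]
  | cons c rt ih =>
    intro rms a hlen
    match rms with
    | [] => simp at hlen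
    | m :: mt =>
      have hmt : mt.length = rt.length := by simpa using hlen
      have hrtl : rt.reverse.length = rt.length := by simp
      have hmtl : mt.reverse.length = rt.length := by simp [hmt]
      have hlast : (rt.reverse ++ [c])[rt.length]? = some c := by
        rw [← hrtl]; exact List.getElem?_concat_length
      have hmlast : ((mt.reverse ++ [m])[rt.length]?).getD ' ' = m := by
        rw [← hmtl]; simp
      have hdroplast : (rt.reverse ++ [c]).drop (rt.length + 1) = [] := by
        apply List.drop_eq_nil_of_le; simp
      have hstable : ∀ j, j < rt.length →
          ((rt.reverse ++ [c])[j]? = rt.reverse[j]? ∧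
           ((mt.reverse ++ [m])[j]?).getD ' ' = ((mt.reverse)[j]?).getD ' ' ∧
           (rt.reverse ++ [c]).drop (j + 1) = rt.reverse.drop (j + 1) ++ [c]) := by
        intro j hj
        refine ⟨?_, ?_, ?_⟩
        · exact List.getElem?_append_left (by omega)
        · rw [List.getElem?_append_left (by omega)]
        · rw [List.drop_append_of_le_length (by omega)]
      have hrangesucc : List.range (rt.length + 1) = List.range rt.length ++ [rt.length] := List.range_succ
      -- step on the head of the zipped list
      by_cases h1 : c = ')'
      · subst h1
        have : pvBwdN a ((')', m) :: rt.zip mt) = m :: pvBwdN (a + 1) (rt.zip mt) := by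
          simp [pvBwdN]
        simp only [List.zip_cons_cons, this, List.reverse_cons, List.length_cons, hrangesucc,
          List.map_append, List.map_cons, List.map_nil]
        rw [ih mt (a + 1) hmt]
        congr 1
        · apply List.map_congr_left
          intro j hj
          have hj' : j < rt.length := List.mem_range.mp hj
          obtain ⟨e1, e2, e3⟩ := hstable j hj'
          rw [e1, e2, e3, pvF_append, pvF_single]
          simp
        · simp [hlast, hmlast]
      · by_cases h2 : c = '('
        · subst h2
          have hseed : pvF a [('(' : Char)] = a - 1 := by simp [pvF_single]
          have hstep : pvBwdN a (('(', m) :: rt.zip mt) =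
              (if a = 0 then 'x' else ' ') :: pvBwdN (a - 1) (rt.zip mt) := by
            by_cases hz : a = 0
            · subst hz; simp [pvBwdN]
            · simp [pvBwdN, hz]
          simp only [List.zip_cons_cons, hstep, List.reverse_cons, List.length_cons, hrangesucc,
            List.map_append, List.map_cons, List.map_nil]
          rw [ih mt (a - 1) hmt]
          congr 1
          · apply List.map_congr_left
            intro j hj
            have hj' : j < rt.length := List.mem_range.mp hj
            obtain ⟨e1, e2, e3⟩ := hstable j hj'
            rw [e1, e2, e3, pvF_append, hseed]
          · simp [hlast, hdroplast, pvF]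
        · have hstep : pvBwdN a ((c, m) :: rt.zip mt) = m :: pvBwdN a (rt.zip mt) := by
            simp [pvBwdN, h1, h2]
          simp only [List.zip_cons_cons, hstep, List.reverse_cons, List.length_cons, hrangesucc,
            List.map_append, List.map_cons, List.map_nil]
          rw [ih mt a hmt]
          congr 1
          · apply List.map_congr_left
            intro j hj
            have hj' : j < rt.length := List.mem_range.mp hj
            obtain ⟨e1, e2, e3⟩ := hstable j hj'
            rw [e1, e2, e3, pvF_append, pvF_single]
            simp [h1, h2]
          · simp [hlast, hmlast, hdroplast, pvF, h1, h2]

theorem pvB_eq_out (cs : List Char) :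
    (pvBwdB 0 (cs.reverse.zip (pvFwdB 0 cs).reverse)).reverse = pvOut cs := by
  have h0 : ((0 : Nat) : Int) = 0 := rfl
  rw [show (0 : Int) = ((0 : Nat) : Int) from rfl, pvFwdB_cast, pvBwdB_cast]
  rw [pvBwdN_spec cs.reverse (pvFwdN 0 cs).reverse 0 (by simp [pvFwdN_length])]
  unfold pvOut
  simp only [List.reverse_reverse, List.length_reverse]
  apply List.map_congr_left
  intro j hj
  have hj' : j < cs.length := List.mem_range.mp hj
  rw [pvFwd_getD cs 0 j hj']
  unfold pvOutFun
  by_cases h1 : cs[j]? = some '('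
  · simp [h1]
  · simp [h1]

-- ===== A-side helper lemmas =====

theorem pvF_le_succ (l : List Char) : ∀ (a : Nat), pvF (a + 1) l ≤ pvF a l + 1 := by
  induction l with
  | nil => intro a; simp [pvF]
  | cons c t ih =>
    intro a
    simp only [pvF]
    have := ih a
    by_cases h1 : c = ')' <;> by_cases h2 : c = '(' <;> simp [h1, h2] <;> omega

theorem pvF_mono (l : List Char) : ∀ (a b : Nat), a ≤ b → pvF a l ≤ pvF b l := by
  induction l with
  | nil => intro a b h; simpa [pvF] using h
  | cons c t ih =>
    intro a b h
    simp only [pvF]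
    have := ih a b h
    by_cases h1 : c = ')' <;> by_cases h2 : c = '(' <;> simp [h1, h2] <;> omega

theorem pvF_no_witness (l : List Char) : ∀ (a : Nat),
    (∀ j, l[j]? = some '(' → pvF a (l.drop (j + 1)) ≠ 0) →
    pvF (a + 1) l = pvF a l + 1 := by
  induction l with
  | nil => intro a _; simp [pvF]
  | cons c t ih =>
    intro a hw
    have hw' : ∀ j, t[j]? = some '(' → pvF a (t.drop (j + 1)) ≠ 0 := by
      intro j hj
      have := hw (j + 1) (by simpa using hj)
      simpa using this
    have hih := ih a hw'
    simp only [pvF, hih]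
    by_cases h1 : c = ')'
    · simp [h1]
    · by_cases h2 : c = '('
      · have hnz : pvF a t ≠ 0 := by
          have := hw 0 (by simp [h2])
          simpa using this
        simp [h1, h2]
        omega
      · simp [h1, h2]

theorem pvF_witness (l : List Char) : ∀ (a j : Nat),
    l[j]? = some '(' → pvF a (l.drop (j + 1)) = 0 → pvF (a + 1) l = pvF a l := by
  induction l with
  | nil => intro a j h _; simp at h
  | cons c t ih =>
    intro a j hj hz
    match j with
    | 0 =>
      have hc : c = '(' := by simpa using hj
      subst hc
      have hz' : pvF a t = 0 := by simpa using hz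
      have h1 : pvF (a + 1) t ≤ 1 := by
        have := pvF_le_succ t a; omega
      have e1 : pvF (a + 1) ('(' :: t) = pvF (a + 1) t - 1 := by simp [pvF]
      have e2 : pvF a ('(' :: t) = pvF a t - 1 := by simp [pvF]
      rw [e1, e2]
      omega
    | j + 1 =>
      have hj' : t[j]? = some '(' := by simpa using hj
      have hz' : pvF a (t.drop (j + 1)) = 0 := by simpa using hz
      have hih := ih a j hj' hz'
      simp only [pvF, hih]

theorem pvFD (l : List Char) : ∀ (a : Nat), a ≤ pvDN a l + pvF 0 l := by
  induction l with
  | nil => intro a; simp [pvDN, pvF]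
  | cons c t ih =>
    intro a
    simp only [pvDN, pvF]
    by_cases h1 : c = '('
    · have := ih (a + 1); simp [h1]; omega
    · by_cases h2 : c = ')'
      · have := ih (a - 1); simp [h1, h2]; omega
      · have := ih a; simp [h1, h2]; omega

theorem pvDZ (l : List Char) : ∀ (a : Nat), pvDN a l = 0 →
    ∀ j, l[j]? = some '(' → pvF 0 (l.drop (j + 1)) ≠ 0 := by
  induction l with
  | nil => intro a _ j h; simp at h
  | cons c t ih =>
    intro a h j hj
    match j with
    | 0 =>
      have hc : c = '(' := by simpa using hj
      subst hc
      have h' : pvDN (a + 1) t = 0 := by simpa [pvDN] using h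
      have := pvFD t (a + 1)
      simp only [List.drop_succ_cons, List.drop_zero]
      omega
    | j + 1 =>
      have hj' : t[j]? = some '(' := by simpa using hj
      have h' : pvDN (if c = '(' then a + 1 else if c = ')' then a - 1 else a) t = 0 := by
        simpa [pvDN] using h
      have := ih _ h' j hj'
      simpa using this

theorem pvStk_append (u : List Char) : ∀ (s : List Int) (i : Int) (v : List Char),
    pvStk s i (u ++ v) = pvStk (pvStk s i u) (i + u.length) v := by
  induction u with
  | nil => intro s i v; simp [pvStk]
  | cons c u ih =>
    intro s i v
    have hlen : (((c :: u).length : Nat) : Int) = (u.length : Int) + 1 := by simp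
    have harith : i + ((u.length : Int) + 1) = (i + 1) + (u.length : Int) := by ring
    by_cases h1 : c = '('
    · simp only [List.cons_append, pvStk, if_pos h1, ih, hlen, harith]
    · by_cases h2 : c = ')'
      · simp only [List.cons_append, pvStk, if_neg h1, if_pos h2, ih, hlen, harith]
      · simp only [List.cons_append, pvStk, if_neg h1, if_neg h2, ih, hlen, harith]

theorem pvRend_append (u : List Char) : ∀ (d : Nat) (v : List Char),
    pvRend d (u ++ v) = pvRend d u ++ pvRend (pvDN d u) v := by
  induction u with
  | nil => intro d v; simp [pvRend, pvDN]
  | cons c u ih =>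
    intro d v
    by_cases h1 : c = '('
    · simp [pvRend, pvDN, h1, ih]
    · by_cases h2 : c = ')'
      · rcases Nat.eq_zero_or_pos d with hd | hd
        · subst hd; simp [pvRend, pvDN, h1, h2, ih]
        · have : d ≠ 0 := by omega
          simp [pvRend, pvDN, h1, h2, this, ih]
      · simp [pvRend, pvDN, h1, h2, ih]

theorem pvStk_length (l : List Char) : ∀ (s : List Int) (i : Int),
    (pvStk s i l).length = pvDN s.length l := by
  induction l with
  | nil => intro s i; simp [pvStk, pvDN]
  | cons c t ih =>
    intro s i
    by_cases h1 : c = '('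
    · simp [pvStk, pvDN, h1, ih]
    · by_cases h2 : c = ')'
      · simp only [pvStk, pvDN, if_neg h1, if_pos h2, ih]
        congr 1
        exact List.length_dropLast
      · simp [pvStk, pvDN, h1, h2, ih]

theorem pvFoldIns_length (S : List Int) : ∀ (r : List Char),
    (S.foldl (fun r idx => PySem.List.insert r idx 'x') r).length = r.length + S.length := by
  induction S with
  | nil => intro r; simp
  | cons p S ih =>
    intro r
    simp only [List.foldl_cons]
    rw [ih]
    simp [PySem.List.length_insert]
    omega

theorem pvInsert_append (r t : List Char) (p : Nat) (hp : p ≤ r.length) :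
    PySem.List.insert (r ++ t) (p : Int) 'x' = PySem.List.insert r (p : Int) 'x' ++ t := by
  rw [PySem.List.insert_natCast (r ++ t) p 'x' (by simp; omega),
    PySem.List.insert_natCast r p 'x' hp,
    List.take_append_of_le_length hp, List.drop_append_of_le_length hp]
  simp

theorem pvFoldIns_append (S : List Nat) : ∀ (r t : List Char),
    (∀ k (_ : k < S.length), S[k] ≤ r.length + k) →
    (S.map Int.ofNat).foldl (fun r idx => PySem.List.insert r idx 'x') (r ++ t) =
      (S.map Int.ofNat).foldl (fun r idx => PySem.List.insert r idx 'x') r ++ t := by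
  induction S with
  | nil => intro r t _; simp
  | cons p S ih =>
    intro r t hb
    have hp : p ≤ r.length := by have := hb 0 (by simp); simpa using this
    simp only [List.map_cons, List.foldl_cons]
    rw [show (Int.ofNat p) = ((p : Nat) : Int) from rfl, pvInsert_append r t p hp]
    apply ih
    intro k hk
    have := hb (k + 1) (by simpa using Nat.succ_lt_succ hk)
    simp only [List.getElem_cons_succ] at this
    simp only [PySem.List.length_insert]
    omega

theorem pvPairwise_get_mono (S : List Nat) (hS : S.Pairwise (· < ·)) :
    ∀ (j : Nat) (hj : j < S.length) (k : Nat) (hk : k ≤ j), S[k]'(by omega) + (j - k) ≤ S[j] := by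
  intro j
  induction j with
  | zero => intro hj k hk; interval_cases k; simp
  | succ j ihj =>
    intro hj k hk
    rcases Nat.eq_or_lt_of_le hk with he | hl
    · subst he; simp
    · have hk' : k ≤ j := by omega
      have h1 := ihj (by omega) k hk'
      have h2 : S[j]'(by omega) < S[j + 1]'hj :=
        List.pairwise_iff_getElem.mp hS j (j + 1) (by omega) hj (by omega)
      omega

theorem pvPos_bound (S : List Nat) (n : Nat) (hS : S.Pairwise (· < ·))
    (hlt : ∀ x ∈ S, x < n) : ∀ k (_ : k < S.length), S[k] + (S.length - k) ≤ n := by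
  intro k hk
  have hlast := pvPairwise_get_mono S hS (S.length - 1) (by omega) k (by omega)
  have : S[S.length - 1]'(by omega) < n := hlt _ (List.getElem_mem _)
  omega

theorem pvXs_pairwise (cs : List Char) : (pvXs cs).Pairwise (· < ·) :=
  List.Pairwise.sublist List.filter_sublist (List.pairwise_lt_range)

theorem pvXs_mem_iff (cs : List Char) (j : Nat) :
    j ∈ pvXs cs ↔ j < cs.length ∧ cs[j]? = some '(' ∧ pvF 0 (cs.drop (j + 1)) = 0 := by
  simp [pvXs, pvXb, List.mem_filter, List.mem_range, and_assoc]

theorem pvSnoc_getElem (cs : List Char) (c : Char) (j : Nat) (hj : j < cs.length) :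
    (cs ++ [c])[j]? = cs[j]? := List.getElem?_append_left hj

theorem pvSnoc_take (cs : List Char) (c : Char) (j : Nat) (hj : j ≤ cs.length) :
    (cs ++ [c]).take j = cs.take j := List.take_append_of_le_length hj

theorem pvSnoc_drop (cs : List Char) (c : Char) (j : Nat) (hj : j + 1 ≤ cs.length) :
    (cs ++ [c]).drop (j + 1) = cs.drop (j + 1) ++ [c] := List.drop_append_of_le_length hj

theorem pvSnoc_F (cs : List Char) (c : Char) (j : Nat) (hj : j < cs.length) :
    pvF 0 ((cs ++ [c]).drop (j + 1)) = pvF (pvF 0 [c]) (cs.drop (j + 1)) := by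
  rw [pvSnoc_drop _ _ _ (by omega), pvF_append]

theorem pvOut_length (cs : List Char) : (pvOut cs).length = cs.length := by simp [pvOut]

theorem pvOut_getElem (cs : List Char) (j : Nat) (hj : j < cs.length) :
    (pvOut cs)[j]'(by simp [pvOut]; omega) = pvOutFun cs j := by
  simp [pvOut]

theorem pvOut_snoc (cs : List Char) (c : Char) :
    pvOut (cs ++ [c]) =
      (List.range cs.length).map (pvOutFun (cs ++ [c])) ++ [pvOutFun (cs ++ [c]) cs.length] := by
  unfold pvOut
  rw [show (cs ++ [c]).length = cs.length + 1 by simp, List.range_succ, List.map_append]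
  simp

theorem pvOutFun_last (cs : List Char) (c : Char) :
    pvOutFun (cs ++ [c]) cs.length =
      (if c = '(' then 'x'
       else if c = ')' then (if pvDN 0 cs = 0 then '?' else ' ')
       else ' ') := by
  unfold pvOutFun
  have h1 : (cs ++ [c])[cs.length]? = some c := List.getElem?_concat_length
  have h2 : (cs ++ [c]).take cs.length = cs := by
    rw [List.take_append_of_le_length (by omega)]; simp
  have h3 : (cs ++ [c]).drop (cs.length + 1) = [] := List.drop_eq_nil_of_le (by simp)
  rw [h1, h2, h3]
  simp [pvF]

theorem pvOutFun_stab_nonclose (cs : List Char) (c : Char) (hc : c ≠ ')') (j : Nat)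
    (hj : j < cs.length) : pvOutFun (cs ++ [c]) j = pvOutFun cs j := by
  unfold pvOutFun
  rw [pvSnoc_getElem _ _ _ hj, pvSnoc_take _ _ _ (by omega), pvSnoc_F _ _ _ hj,
    show pvF 0 [c] = 0 from by simp [pvF, hc]]

theorem pvXb_stab_nonclose (cs : List Char) (c : Char) (hc : c ≠ ')') (j : Nat)
    (hj : j < cs.length) : pvXb (cs ++ [c]) j = pvXb cs j := by
  unfold pvXb
  rw [pvSnoc_getElem _ _ _ hj, pvSnoc_F _ _ _ hj, show pvF 0 [c] = 0 from by simp [pvF, hc]]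

theorem pvF_one_eq_of_wit (cs : List Char) (j p : Nat) (hjp : j < p) (hp : p < cs.length)
    (hpget : cs[p]? = some '(') (hpz : pvF 0 (cs.drop (p + 1)) = 0) :
    pvF 1 (cs.drop (j + 1)) = pvF 0 (cs.drop (j + 1)) := by
  have hwit : (cs.drop (j + 1))[p - j - 1]? = some '(' := by
    rw [List.getElem?_drop, show j + 1 + (p - j - 1) = p by omega]
    exact hpget
  have hdd : (cs.drop (j + 1)).drop ((p - j - 1) + 1) = cs.drop (p + 1) := by
    rw [List.drop_drop]; congr 1; omega
  have := pvF_witness (cs.drop (j + 1)) 0 (p - j - 1) hwit (by rw [hdd]; exact hpz)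
  simpa using this

theorem pvF_one_at_max (cs : List Char) (p : Nat) (_ : p < cs.length)
    (hmax : ∀ q, q < cs.length → cs[q]? = some '(' → pvF 0 (cs.drop (q + 1)) = 0 → q ≤ p) :
    pvF 1 (cs.drop (p + 1)) = pvF 0 (cs.drop (p + 1)) + 1 := by
  have h := pvF_no_witness (cs.drop (p + 1)) 0 (by
    intro j hj hz
    have hq : cs[p + 1 + j]? = some '(' := by rw [← List.getElem?_drop]; exact hj
    have hqlt : p + 1 + j < cs.length := by
      rcases List.getElem?_eq_some_iff.mp hq with ⟨h, _⟩
      exact h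
    have hdd : (cs.drop (p + 1)).drop (j + 1) = cs.drop (p + 1 + j + 1) := by
      rw [List.drop_drop]; congr 1; try omega
    have := hmax (p + 1 + j) hqlt hq (by rw [← hdd]; exact hz)
    omega)
  simpa using h

theorem pvTakeDropSplit (cs : List Char) (p j : Nat) (hpj : p + 1 ≤ j) (hj : j ≤ cs.length) :
    (cs.take j).drop (p + 1) ++ cs.drop j = cs.drop (p + 1) := by
  conv_rhs => rw [← List.take_append_drop j cs]
  rw [List.drop_append_of_le_length (by simp; omega)]

theorem pvSS (cs : List Char) (p : Nat) (hp : p < cs.length)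
    (hpget : cs[p]? = some '(') (hpz : pvF 0 (cs.drop (p + 1)) = 0)
    (hmax : ∀ q, q < cs.length → cs[q]? = some '(' → pvF 0 (cs.drop (q + 1)) = 0 → q ≤ p)
    (j : Nat) (hpj : p < j) (hj : j < cs.length) : pvOutFun cs j = ' ' := by
  unfold pvOutFun
  by_cases hx : cs[j]? = some '('
  · have hnz : pvF 0 (cs.drop (j + 1)) ≠ 0 := by
      intro h0; have := hmax j hj hx h0; omega
    simp [hx, hnz]
  · by_cases hcl : cs[j]? = some ')'
    · have hq : pvDN 0 (cs.take j) ≠ 0 := by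
        intro h0
        have hptk : (cs.take j)[p]? = some '(' := by
          rw [List.getElem?_take_of_lt hpj]; exact hpget
        have hdz := pvDZ (cs.take j) 0 h0 p hptk
        have hsplit := pvTakeDropSplit cs p j (by omega) (by omega)
        have happ := pvF_append (cs.drop j) ((cs.take j).drop (p + 1)) 0
        rw [hsplit] at happ
        have hmono := pvF_mono ((cs.take j).drop (p + 1)) 0 (pvF 0 (cs.drop j)) (by omega)
        omega
      simp [hx, hcl, hq]
    · simp [hx, hcl]

theorem pvOutFun_stab_close (cs : List Char) (j : Nat) (hj : j < cs.length)
    (hX : cs[j]? = some '(' → (pvF 1 (cs.drop (j + 1)) = 0 ↔ pvF 0 (cs.drop (j + 1)) = 0)) :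
    pvOutFun (cs ++ [')']) j = pvOutFun cs j := by
  unfold pvOutFun
  rw [pvSnoc_getElem _ _ _ hj, pvSnoc_take _ _ _ (by omega), pvSnoc_F _ _ _ hj,
    show pvF 0 [')'] = 1 from by simp [pvF]]
  by_cases hx : cs[j]? = some '('
  · have hiff := hX hx
    by_cases hz : pvF 0 (cs.drop (j + 1)) = 0
    · simp [hx, hz, hiff.mpr hz]
    · have hz1 : ¬ pvF 1 (cs.drop (j + 1)) = 0 := fun h => hz (hiff.mp h)
      simp [hx, hz1, hz]
  · simp [hx]

theorem pvA_char (cs : List Char) :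
    pvStk [] 0 cs = (pvXs cs).map Int.ofNat ∧
      (pvStk [] 0 cs).foldl (fun r idx => PySem.List.insert r idx 'x') (pvRend 0 cs) = pvOut cs := by
  induction cs using List.reverseRecOn with
  | nil => constructor <;> simp [pvStk, pvXs, pvRend, pvOut]
  | append_singleton cs c ih =>
    obtain ⟨ih1, ih2⟩ := ih
    rw [ih1] at ih2
    have hstkapp : pvStk [] 0 (cs ++ [c]) =
        pvStk (pvStk [] 0 cs) ((cs.length : Nat) : Int) [c] := by
      have h := pvStk_append cs [] 0 [c]
      simpa using h
    rw [ih1] at hstkapp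
    have hXlen : (pvXs cs).length ≤ cs.length := by
      have := List.length_filter_le (pvXb cs) (List.range cs.length)
      simpa [pvXs] using this
    have hdn : pvDN 0 cs = (pvXs cs).length := by
      have h := pvStk_length cs ([] : List Int) 0
      rw [ih1] at h
      simpa using h.symm
    have houtlen := congrArg List.length ih2
    rw [pvFoldIns_length, pvOut_length] at houtlen
    have hrendlen : (pvRend 0 cs).length = cs.length - (pvXs cs).length := by
      simp only [List.length_map] at houtlen; omega
    have hposXs : ∀ k (_ : k < (pvXs cs).length), (pvXs cs)[k] ≤ (pvRend 0 cs).length + k := by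
      intro k hk
      have hb := pvPos_bound (pvXs cs) cs.length (pvXs_pairwise cs)
        (fun x hx => ((pvXs_mem_iff cs x).mp hx).1) k hk
      omega
    have hrendapp : pvRend 0 (cs ++ [c]) = pvRend 0 cs ++ pvRend (pvDN 0 cs) [c] :=
      pvRend_append cs 0 [c]
    by_cases hc1 : c = '('
    · -- appended char is '(' : it is a fresh unmatched open at position cs.length
      subst hc1
      have hstab : ∀ j ∈ List.range cs.length, pvXb (cs ++ ['(']) j = pvXb cs j := fun j hj =>
        pvXb_stab_nonclose cs '(' (by decide) j (List.mem_range.mp hj)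
      have hXsnew : pvXs (cs ++ ['(']) = pvXs cs ++ [cs.length] := by
        unfold pvXs
        rw [show (cs ++ ['(']).length = cs.length + 1 by simp, List.range_succ,
          List.filter_append, List.filter_congr hstab]
        congr 1
        have hnew : pvXb (cs ++ ['(']) cs.length = true := by
          unfold pvXb
          rw [List.getElem?_concat_length,
            show (cs ++ ['(']).drop (cs.length + 1) = [] from List.drop_eq_nil_of_le (by simp)]
          simp [pvF]
        simp [hnew]
      have hstk1 : pvStk ((pvXs cs).map Int.ofNat) ((cs.length : Nat) : Int) ['('] =
          (pvXs cs).map Int.ofNat ++ [((cs.length : Nat) : Int)] := by simp [pvStk]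
      constructor
      · rw [hstkapp, hstk1, hXsnew]
        simp
      · rw [hstkapp, hstk1, hrendapp,
          show pvRend (pvDN 0 cs) ['('] = [] from by simp [pvRend], List.append_nil,
          List.foldl_append]
        simp only [List.foldl_cons, List.foldl_nil]
        rw [ih2]
        have hinslen : PySem.List.insert (pvOut cs) ((cs.length : Nat) : Int) 'x' =
            pvOut cs ++ ['x'] := by
          rw [show ((cs.length : Nat) : Int) = ((pvOut cs).length : Int) from by
            rw [pvOut_length]]
          exact PySem.List.insert_len ..
        rw [hinslen, pvOut_snoc, pvOutFun_last]
        simp only [if_pos rfl]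
        congr 1
        unfold pvOut
        apply List.map_congr_left
        intro j hj
        exact (pvOutFun_stab_nonclose cs '(' (by decide) j (List.mem_range.mp hj)).symm
    · by_cases hc2 : c = ')'
      · subst hc2
        by_cases hE : pvXs cs = []
        · -- no unmatched '(' left of it: the appended ')' is unmatched ('?')
          have hdn0 : pvDN 0 cs = 0 := by rw [hdn, hE]; rfl
          have hXball : ∀ j, j < cs.length → pvXb cs j = false := by
            intro j hj
            have hnil := List.filter_eq_nil_iff.mp
              (show (List.range cs.length).filter (pvXb cs) = [] from hE)
            by_contra hb
            have hb' : pvXb cs j = true := by revert hb; cases (pvXb cs j) <;> simp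
            exact absurd hb' (hnil j (List.mem_range.mpr hj))
          have hXdead : ∀ j, j < cs.length → cs[j]? = some '(' →
              pvF 0 (cs.drop (j + 1)) ≠ 0 := by
            intro j hj hx
            have hold := hXball j hj
            unfold pvXb at hold
            rw [hx] at hold
            simpa using hold
          have hXsnew : pvXs (cs ++ [')']) = [] := by
            unfold pvXs
            apply List.filter_eq_nil_iff.mpr
            intro a ha
            have ha' : a < cs.length + 1 := by simpa using List.mem_range.mp ha
            rcases Nat.lt_or_ge a cs.length with h | h
            · have hd := hXdead a h
              unfold pvXb
              rw [pvSnoc_getElem _ _ _ h, pvSnoc_F _ _ _ h,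
                show pvF 0 [')'] = 1 from by simp [pvF]]
              by_cases hx : cs[a]? = some '('
              · have hmono := pvF_mono (cs.drop (a + 1)) 0 1 (by omega)
                have := hd hx
                simp [hx]
                omega
              · simp [hx]
            · have haa : a = cs.length := by omega
              subst haa
              unfold pvXb
              rw [List.getElem?_concat_length]
              simp
          have hstk1 : pvStk ((pvXs cs).map Int.ofNat) ((cs.length : Nat) : Int) [')'] =
              ((pvXs cs).map Int.ofNat).dropLast := by simp [pvStk]
          constructor
          · rw [hstkapp, hstk1, hXsnew, hE]
            rfl
          · rw [hstkapp, hstk1, hE, hrendapp, hdn0,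
              show pvRend 0 [')'] = ['?'] from by simp [pvRend]]
            rw [hE] at ih2
            simp only [List.map_nil, List.dropLast_nil, List.foldl_nil] at ih2 ⊢
            rw [ih2, pvOut_snoc, pvOutFun_last]
            rw [if_neg (by decide : ¬((')' : Char) = '(')), if_pos rfl, if_pos hdn0]
            congr 1
            unfold pvOut
            apply List.map_congr_left
            intro j hj
            have hj' := List.mem_range.mp hj
            refine (pvOutFun_stab_close cs j hj' ?_).symm
            intro hx
            have hd := hXdead j hj' hx
            have hmono := pvF_mono (cs.drop (j + 1)) 0 1 (by omega)
            constructor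
            · intro h1; omega
            · intro h0; omega
        · -- the appended ')' matches the rightmost unmatched '(' at position p
          have hTp : pvXs cs = (pvXs cs).dropLast ++ [(pvXs cs).getLast hE] :=
            (List.dropLast_append_getLast hE).symm
          obtain ⟨T, p, hTp⟩ : ∃ T p, pvXs cs = T ++ [p] :=
            ⟨(pvXs cs).dropLast, (pvXs cs).getLast hE, hTp⟩
          have hpmem : p ∈ pvXs cs := by rw [hTp]; simp
          obtain ⟨hplt, hpget, hpz⟩ := (pvXs_mem_iff cs p).mp hpmem
          have hpair := pvXs_pairwise cs
          rw [hTp] at hpair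
          have hTlt : ∀ x ∈ T, x < p := by
            intro x hx
            exact (List.pairwise_append.mp hpair).2.2 x hx p (by simp)
          have hmaxq : ∀ q, q < cs.length → cs[q]? = some '(' →
              pvF 0 (cs.drop (q + 1)) = 0 → q ≤ p := by
            intro q hq1 hq2 hq3
            have hqmem : q ∈ pvXs cs := (pvXs_mem_iff cs q).mpr ⟨hq1, hq2, hq3⟩
            rw [hTp] at hqmem
            rcases List.mem_append.mp hqmem with h | h
            · exact le_of_lt (hTlt q h)
            · simp at h; omega
          have hdnne : ¬ pvDN 0 cs = 0 := by rw [hdn, hTp]; simp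
          have hXsl : (pvXs cs).length = T.length + 1 := by rw [hTp]; simp
          have hstabp : pvXb (cs ++ [')']) p = false := by
            unfold pvXb
            rw [pvSnoc_getElem _ _ _ hplt, pvSnoc_F _ _ _ hplt,
              show pvF 0 [')'] = 1 from by simp [pvF], pvF_one_at_max cs p hplt hmaxq]
            simp
          have hstabne : ∀ j, j < cs.length → j ≠ p →
              pvXb (cs ++ [')']) j = pvXb cs j := by
            intro j hj hjp
            unfold pvXb
            rw [pvSnoc_getElem _ _ _ hj, pvSnoc_F _ _ _ hj,
              show pvF 0 [')'] = 1 from by simp [pvF]]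
            by_cases hx : cs[j]? = some '('
            · by_cases hz : pvF 0 (cs.drop (j + 1)) = 0
              · have hjlt : j < p := by
                  have := hmaxq j hj hx hz; omega
                rw [pvF_one_eq_of_wit cs j p hjlt hplt hpget hpz]
              · have hmono := pvF_mono (cs.drop (j + 1)) 0 1 (by omega)
                have hz1 : ¬ pvF 1 (cs.drop (j + 1)) = 0 := by omega
                simp [hx, hz, hz1]
            · simp [hx]
          have hXsnew : pvXs (cs ++ [')']) = T := by
            unfold pvXs
            rw [show (cs ++ [')']).length = cs.length + 1 by simp, List.range_succ,
              List.filter_append]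
            have hlastf : List.filter (pvXb (cs ++ [')'])) [cs.length] = [] := by
              have hfalse : pvXb (cs ++ [')']) cs.length = false := by
                unfold pvXb
                rw [List.getElem?_concat_length]
                simp
              simp [hfalse]
            rw [hlastf, List.append_nil]
            have hcong : ∀ j ∈ List.range cs.length,
                pvXb (cs ++ [')']) j = (pvXb cs j && decide (j ≠ p)) := by
              intro j hj
              have hj' := List.mem_range.mp hj
              by_cases hjp : j = p
              · subst hjp; simp [hstabp]
              · rw [hstabne j hj' hjp]; simp [hjp]
            rw [List.filter_congr hcong, ← List.filter_filter, List.filter_comm,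
              show (List.range cs.length).filter (pvXb cs) = pvXs cs from rfl, hTp,
              List.filter_append]
            have h1 : T.filter (fun j => decide (j ≠ p)) = T :=
              List.filter_eq_self.mpr (fun x hx => by simp [Nat.ne_of_lt (hTlt x hx)])
            have h2 : List.filter (fun j => decide (j ≠ p)) [p] = [] := by simp
            rw [h1, h2, List.append_nil]
          have hstk1 : pvStk ((pvXs cs).map Int.ofNat) ((cs.length : Nat) : Int) [')'] =
              T.map Int.ofNat := by
            have : pvStk ((pvXs cs).map Int.ofNat) ((cs.length : Nat) : Int) [')'] =
                ((pvXs cs).map Int.ofNat).dropLast := by simp [pvStk]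
            rw [this, hTp, List.map_append]
            simp only [List.map_cons, List.map_nil, List.dropLast_concat]
          constructor
          · rw [hstkapp, hstk1, hXsnew]
          · rw [hstkapp, hstk1, hrendapp,
              show pvRend (pvDN 0 cs) [')'] = [' ', ' '] from by simp [pvRend, hdnne]]
            have hposT : ∀ k (_ : k < T.length), T[k] ≤ (pvRend 0 cs).length + k := by
              intro k hk
              have hTpair : T.Pairwise (· < ·) := (List.pairwise_append.mp hpair).1
              have hb := pvPos_bound T p hTpair hTlt k hk
              omega
            rw [pvFoldIns_append T (pvRend 0 cs) [' ', ' '] hposT]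
            rw [hTp, List.map_append, List.foldl_append] at ih2
            simp only [List.map_cons, List.map_nil, List.foldl_cons, List.foldl_nil] at ih2
            set M : List Char :=
              (T.map Int.ofNat).foldl (fun r idx => PySem.List.insert r idx 'x')
                (pvRend 0 cs) with hM
            have hMlen : M.length = cs.length - 1 := by
              rw [hM, pvFoldIns_length]
              simp only [List.length_map]
              omega
            have hplen : p ≤ M.length := by omega
            have hins : M.take p ++ 'x' :: M.drop p = pvOut cs := by
              rw [← PySem.List.insert_natCast M p 'x' hplen]
              exact ih2
            have hMtake : M.take p = (pvOut cs).take p := by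
              rw [← hins, List.take_append_of_le_length (by simp [List.length_take]; omega),
                List.take_take]
              congr 1
              omega
            have hlen1 : (M.take p).length = p := by rw [List.length_take]; omega
            have hMdrop : M.drop p = (pvOut cs).drop (p + 1) := by
              rw [← hins,
                show M.take p ++ 'x' :: M.drop p = (M.take p ++ ['x']) ++ M.drop p by simp,
                List.drop_left' (by simp [hlen1])]
            have hMsplit : M = (pvOut cs).take p ++ (pvOut cs).drop (p + 1) := by
              conv_lhs => rw [← List.take_append_drop p M]
              rw [hMtake, hMdrop]
            rw [hMsplit, pvOut_snoc, pvOutFun_last,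
              if_neg (by decide : ¬((')' : Char) = '(')), if_pos rfl, if_neg hdnne]
            rw [show List.range cs.length =
                List.range p ++ (List.range (cs.length - p)).map (p + ·) from by
              rw [← List.range_add]; congr 1; omega]
            rw [List.map_append]
            have hfirst : (List.range p).map (pvOutFun (cs ++ [')'])) = (pvOut cs).take p := by
              have htk : (pvOut cs).take p = (List.range p).map (pvOutFun cs) := by
                unfold pvOut
                rw [← List.map_take, List.take_range]
                congr 2
                omega
              rw [htk]
              apply List.map_congr_left
              intro j hj
              have hj' : j < p := List.mem_range.mp hj
              refine pvOutFun_stab_close cs j (by omega) ?_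
              intro hx
              rw [pvF_one_eq_of_wit cs j p hj' hplt hpget hpz]
            have hsecond : ((List.range (cs.length - p)).map (p + ·)).map
                (pvOutFun (cs ++ [')'])) = List.replicate (cs.length - p) ' ' := by
              rw [List.map_map]
              apply List.eq_replicate_iff.mpr
              refine ⟨by simp, ?_⟩
              intro b hb
              obtain ⟨k, hk, rfl⟩ := List.mem_map.mp hb
              simp only [Function.comp_apply]
              have hk' : k < cs.length - p := List.mem_range.mp hk
              rcases Nat.eq_zero_or_pos k with h0 | hkpos
              · subst h0
                show pvOutFun (cs ++ [')']) (p + 0) = ' '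
                unfold pvOutFun
                rw [show p + 0 = p from rfl,
                  pvSnoc_getElem _ _ _ hplt, pvSnoc_F _ _ _ hplt,
                  show pvF 0 [')'] = 1 from by simp [pvF],
                  pvF_one_at_max cs p hplt hmaxq, hpget]
                simp
              · have hjlt : p + k < cs.length := by omega
                have hstab : pvOutFun (cs ++ [')']) (p + k) = pvOutFun cs (p + k) := by
                  refine pvOutFun_stab_close cs (p + k) hjlt ?_
                  intro hx
                  have hnz : pvF 0 (cs.drop (p + k + 1)) ≠ 0 := by
                    intro h0
                    have := hmaxq (p + k) hjlt hx h0
                    omega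
                  have hmono := pvF_mono (cs.drop (p + k + 1)) 0 1 (by omega)
                  constructor
                  · intro h1; omega
                  · intro h0; omega
                rw [hstab]
                exact pvSS cs p hplt hpget hpz hmaxq (p + k) (by omega) hjlt
            rw [hfirst, hsecond]
            have hdropRep : (pvOut cs).drop (p + 1) =
                List.replicate (cs.length - 1 - p) ' ' := by
              apply List.eq_replicate_iff.mpr
              constructor
              · simp [pvOut_length]
                omega
              · intro b hb
                obtain ⟨i, hi, hbe⟩ := List.mem_iff_getElem.mp hb
                have hilen : i < cs.length - (p + 1) := by
                  simpa [pvOut_length] using hi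
                rw [← hbe, List.getElem_drop]
                rw [pvOut_getElem cs (p + 1 + i) (by omega)]
                exact pvSS cs p hplt hpget hpz hmaxq (p + 1 + i) (by omega) (by omega)
            rw [hdropRep]
            rw [List.append_assoc, List.append_assoc]
            congr 1
            rw [show ([' ', ' '] : List Char) = List.replicate 2 ' ' from rfl,
              show ([' '] : List Char) = List.replicate 1 ' ' from rfl,
              ← List.replicate_add, ← List.replicate_add]
            congr 1
            omega
      · -- ordinary character: it just becomes a space
        have hstab : ∀ j ∈ List.range cs.length, pvXb (cs ++ [c]) j = pvXb cs j := fun j hj =>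
          pvXb_stab_nonclose cs c hc2 j (List.mem_range.mp hj)
        have hXsnew : pvXs (cs ++ [c]) = pvXs cs := by
          unfold pvXs
          rw [show (cs ++ [c]).length = cs.length + 1 by simp, List.range_succ,
            List.filter_append, List.filter_congr hstab]
          have hnew : pvXb (cs ++ [c]) cs.length = false := by
            unfold pvXb
            rw [List.getElem?_concat_length]
            simp [hc1]
          simp [hnew, pvXs]
        have hstk1 : pvStk ((pvXs cs).map Int.ofNat) ((cs.length : Nat) : Int) [c] =
            (pvXs cs).map Int.ofNat := by simp [pvStk, hc1, hc2]
        constructor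
        · rw [hstkapp, hstk1, hXsnew]
        · rw [hstkapp, hstk1, hrendapp,
            show pvRend (pvDN 0 cs) [c] = [' '] from by simp [pvRend, hc1, hc2],
            pvFoldIns_append (pvXs cs) (pvRend 0 cs) [' '] hposXs, ih2, pvOut_snoc,
            pvOutFun_last, if_neg hc1, if_neg hc2]
          congr 1
          unfold pvOut
          apply List.map_congr_left
          intro j hj
          exact (pvOutFun_stab_nonclose cs c hc2 j (List.mem_range.mp hj)).symm

theorem pv_main (line : String) : bracketsCheck line = bracketsCheck_alt line := by
  unfold bracketsCheck bracketsCheck_alt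
  rw [pvLoopA_eq line.toList [] [] 0]
  simp only [List.nil_append, List.length_nil]
  rw [(pvA_char line.toList).2, pvB_eq_out line.toList]

-- ===== VERDICT (by name: the statement is the Claim_ definition above) =====
theorem bracketsCheck_spec : Claim_equal_bracketsCheck := by
  intro line _
  unfold Spec_bracketsCheck
  exact pv_main line
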